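-- pv_equiv track=rewrite | github.com/Hanibal24/Syllabus | Tareas/T0/soluciones_tablero.py | armando_lista
-- ===== SOURCE A (Python) =====
-- def armando_lista(tablero: list, lista: list):
--     n=len(tablero)
--     lista_pueba=[]
--     tablero_3=[]
--     for k in range(n):
--         tablero_2=[]
--         lista_pueba.append([])
--         for j in range (n):
--             tablero_1=[]
--             for i in range(n):
--                 if lista != []:
--                     tablero_1.append(lista[0])
--                     lista.pop(0)
--                 else:
--                     pass
--             tablero_2.append(tablero_1)
--         tablero_3.append(tablero_2)
--
--     for i in range(len(tablero_3)):
--         if tablero_3[-1] == lista_pueba: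
--             tablero_3.pop(-1)
--
--     return tablero_3
-- ===== SOURCE B (Python) =====
-- def armando_lista(tablero: list, lista: list):
--     n = len(tablero)
--     f = lista[:n ** 3]
--     del lista[:n ** 3]  # same mutation as A: the first min(n**3, len) items are consumed
--     rows = [f[r * n:(r + 1) * n] for r in range(n * n)]
--     blocks = [rows[b * n:(b + 1) * n] for b in range(n)]
--     empty = [[] for _ in range(n)]
--     rev = blocks[::-1]
--     while rev and rev[0] == empty:
--         rev = rev[1:]
--     return rev[::-1]
-- ===== Notes on version B (the rewrite author's own statement) =====
-- stated objective: simpler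
-- what changed: Replaces A's triple nested loop that pops lista one element at a time (and the n-bounded pop-last trim loop) with direct slicing: take the first n^3 items once, cut them into n*n rows and n blocks by index arithmetic, and strip trailing all-empty blocks with one while loop on the reversed list.
import Mathlib
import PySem

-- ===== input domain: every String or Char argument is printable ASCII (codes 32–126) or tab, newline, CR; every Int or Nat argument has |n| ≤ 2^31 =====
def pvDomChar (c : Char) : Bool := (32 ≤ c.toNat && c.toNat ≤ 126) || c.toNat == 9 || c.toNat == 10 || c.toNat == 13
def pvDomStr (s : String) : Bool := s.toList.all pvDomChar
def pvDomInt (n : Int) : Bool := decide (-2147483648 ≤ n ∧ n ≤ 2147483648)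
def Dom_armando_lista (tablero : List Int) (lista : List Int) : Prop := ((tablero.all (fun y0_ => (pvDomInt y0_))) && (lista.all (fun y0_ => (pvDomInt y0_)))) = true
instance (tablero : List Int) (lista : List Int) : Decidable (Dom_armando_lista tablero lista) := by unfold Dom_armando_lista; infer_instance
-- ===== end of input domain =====

-- B slices the first n^3 items into rows and blocks by index arithmetic instead of A's
-- triple pop(0) loop; equivalence is about the RETURN value (both Pythons consume the
-- same prefix of lista; lists are immutable here).

-- ===== PORT A =====
-- innermost loop: for i in range(n): pop front of lista into tablero_1 if nonempty
def aRow (n : Nat) (ls : List Int) : List Int × List Int :=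
  (List.range n).foldl (fun st _i =>
    match st with
    | (ls, t1) =>
      match ls with
      | [] => (ls, t1)
      | x :: rest => (rest, t1 ++ [x])) (ls, [])

-- middle loop: for j in range(n): build tablero_1, append to tablero_2
def aLayer (n : Nat) (ls : List Int) : List Int × List (List Int) :=
  (List.range n).foldl (fun st _j =>
    let (ls, t2) := st
    let (ls', t1) := aRow n ls
    (ls', t2 ++ [t1])) (ls, [])

-- outer loop: for k in range(n): append [] to lista_pueba, build tablero_2, append to tablero_3
def aCube (n : Nat) (ls : List Int) : List Int × List (List Int) × List (List (List Int)) :=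
  (List.range n).foldl (fun st _k =>
    let (ls, lp, t3) := st
    let lp' := lp ++ [([] : List Int)]
    let (ls', t2) := aLayer n ls
    (ls', lp', t3 ++ [t2])) (ls, [], [])

def armando_lista (tablero : List Int) (lista : List Int) : List (List (List Int)) :=
  let n := tablero.length
  let (_, lp, t3) := aCube n lista
  -- trim loop: tablero_3[-1] on nonempty list = getLast?; Python never reaches it empty
  -- (at most one pop per iteration, length = loop count), so the none-branch is a totalization guard
  (List.range t3.length).foldl (fun acc _i =>
    if acc.getLast? = some lp then acc.dropLast else acc) t3

-- ===== PORT B =====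
def armando_lista_alt (tablero : List Int) (lista : List Int) : List (List (List Int)) :=
  let n := tablero.length
  let f := lista.take (n * n * n)
  let rows := (List.range (n * n)).map (fun r => (f.drop (r * n)).take n)
  let blocks := (List.range n).map (fun b => (rows.drop (b * n)).take n)
  let empty := List.replicate n ([] : List Int)
  -- rev = blocks[::-1]; while rev and rev[0] == empty: rev = rev[1:]; return rev[::-1]
  (blocks.reverse.dropWhile (fun b => b = empty)).reverse

-- ===== PRECONDITION & SPEC =====
def Spec_armando_lista (tablero : List Int) (lista : List Int) (out : List (List (List Int))) : Prop := out = armando_lista_alt tablero lista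
instance (tablero : List Int) (lista : List Int) (out : List (List (List Int))) : Decidable (Spec_armando_lista tablero lista out) := by unfold Spec_armando_lista; infer_instance

-- ===== CLAIM (what is proved, stated in full; the proofs are below) =====
def Claim_equal_armando_lista : Prop := ∀ (tablero : List Int) (lista : List Int), Dom_armando_lista tablero lista → Spec_armando_lista tablero lista (armando_lista tablero lista)

-- ===== LEMMAS AND PROOFS =====

-- a fold over range with an index-blind body is function iteration
theorem foldl_const_range {α : Type} (f : α → α) (m : Nat) (init : α) :
    (List.range m).foldl (fun a _ => f a) init = f^[m] init := by
  induction m generalizing init with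
  | zero => simp
  | succ m ih => simp [List.range_succ, ih, Function.iterate_succ_apply']

-- the body of A's innermost loop, as a named step function
def rowStep (st : List Int × List Int) : List Int × List Int :=
  match st with
  | (ls, t1) =>
    match ls with
    | [] => (ls, t1)
    | x :: rest => (rest, t1 ++ [x])

theorem rowIter (n : Nat) : ∀ (ls t1 : List Int),
    rowStep^[n] (ls, t1) = (ls.drop n, t1 ++ ls.take n) := by
  induction n with
  | zero => intro ls t1; simp
  | succ n ih =>
    intro ls t1
    rw [Function.iterate_succ_apply]
    cases ls with
    | nil => simp [rowStep, ih]
    | cons x rest => simp [rowStep, ih]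

theorem aRow_eq (n : Nat) (ls : List Int) : aRow n ls = (ls.drop n, ls.take n) := by
  have h : aRow n ls = rowStep^[n] (ls, []) := foldl_const_range rowStep n (ls, [])
  rw [h, rowIter]; simp

-- the body of A's middle loop
def layerStep (n : Nat) (st : List Int × List (List Int)) : List Int × List (List Int) :=
  let (ls, t2) := st
  let (ls', t1) := aRow n ls
  (ls', t2 ++ [t1])

theorem layerIter (n : Nat) (m : Nat) : ∀ (ls : List Int) (t2 : List (List Int)),
    (layerStep n)^[m] (ls, t2) = (ls.drop (m * n),
      t2 ++ (List.range m).map (fun j => (ls.drop (j * n)).take n)) := by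
  induction m with
  | zero => intro ls t2; simp
  | succ m ih =>
    intro ls t2
    rw [Function.iterate_succ_apply]
    have hs : layerStep n (ls, t2) = (ls.drop n, t2 ++ [ls.take n]) := by
      simp [layerStep, aRow_eq]
    rw [hs, ih]
    simp only [Prod.mk.injEq]
    refine ⟨?_, ?_⟩
    · rw [List.drop_drop]; congr 1; ring
    · rw [List.range_succ_eq_map, List.map_cons, List.map_map]
      have hf : ((fun j => (ls.drop (j * n)).take n) ∘ Nat.succ)
          = (fun j => ((ls.drop n).drop (j * n)).take n) := by
        funext j
        simp only [Function.comp_apply, List.drop_drop]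
        congr 2
        rw [Nat.succ_mul]; ring
      rw [hf]
      simp

theorem aLayer_eq (n : Nat) (ls : List Int) :
    aLayer n ls = (ls.drop (n * n),
      (List.range n).map (fun j => (ls.drop (j * n)).take n)) := by
  have h : aLayer n ls = (layerStep n)^[n] (ls, []) :=
    foldl_const_range (layerStep n) n (ls, [])
  rw [h, layerIter]; simp

-- the body of A's outer loop
def cubeStep (n : Nat) (st : List Int × List (List Int) × List (List (List Int))) :
    List Int × List (List Int) × List (List (List Int)) :=
  let (ls, lp, t3) := st
  let lp' := lp ++ [([] : List Int)]
  let (ls', t2) := aLayer n ls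
  (ls', lp', t3 ++ [t2])

theorem cubeIter (n : Nat) (m : Nat) :
    ∀ (ls : List Int) (lp : List (List Int)) (t3 : List (List (List Int))),
    (cubeStep n)^[m] (ls, lp, t3) = (ls.drop (m * (n * n)),
      lp ++ List.replicate m ([] : List Int),
      t3 ++ (List.range m).map (fun b =>
        (List.range n).map (fun j => (ls.drop (b * (n * n) + j * n)).take n))) := by
  induction m with
  | zero => intro ls lp t3; simp
  | succ m ih =>
    intro ls lp t3
    rw [Function.iterate_succ_apply]
    have hs : cubeStep n (ls, lp, t3) = (ls.drop (n * n), lp ++ [[]],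
        t3 ++ [(List.range n).map (fun j => (ls.drop (j * n)).take n)]) := by
      simp [cubeStep, aLayer_eq]
    rw [hs, ih]
    simp only [Prod.mk.injEq]
    refine ⟨?_, ?_, ?_⟩
    · rw [List.drop_drop]; congr 1; ring
    · simp [List.replicate_succ, List.append_assoc]
    · rw [List.range_succ_eq_map, List.map_cons, List.map_map]
      have hf : ((fun b => (List.range n).map
            (fun j => ((ls.drop (b * (n * n) + j * n)).take n))) ∘ Nat.succ)
          = (fun b => (List.range n).map
            (fun j => (((ls.drop (n * n)).drop (b * (n * n) + j * n)).take n))) := by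
        funext b
        simp only [Function.comp_apply]
        apply List.map_congr_left
        intro j _
        rw [List.drop_drop]
        congr 2
        rw [Nat.succ_mul]; ring
      rw [hf]
      simp

theorem aCube_eq (n : Nat) (ls : List Int) :
    aCube n ls = (ls.drop (n * (n * n)), List.replicate n ([] : List Int),
      (List.range n).map (fun b =>
        (List.range n).map (fun j => (ls.drop (b * (n * n) + j * n)).take n))) := by
  have h : aCube n ls = (cubeStep n)^[n] (ls, [], []) :=
    foldl_const_range (cubeStep n) n (ls, [], [])
  rw [h, cubeIter]; simp

-- A's trim step and its mirror on the reversed list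
def tStep (e : List (List Int)) (acc : List (List (List Int))) : List (List (List Int)) :=
  if acc.getLast? = some e then acc.dropLast else acc

def gStep (e : List (List Int)) (r : List (List (List Int))) : List (List (List Int)) :=
  if r.head? = some e then r.tail else r

theorem tStep_reverse (e : List (List Int)) (acc : List (List (List Int))) :
    tStep e acc = (gStep e acc.reverse).reverse := by
  unfold tStep gStep
  rw [List.head?_reverse]
  split
  · rw [List.tail_reverse, List.reverse_reverse]
  · simp

theorem tIter_reverse (e : List (List Int)) (m : Nat) (acc : List (List (List Int))) :
    (tStep e)^[m] acc = ((gStep e)^[m] acc.reverse).reverse := by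
  induction m generalizing acc with
  | zero => simp
  | succ m ih =>
    rw [Function.iterate_succ_apply, tStep_reverse, ih, List.reverse_reverse,
      Function.iterate_succ_apply]

theorem gIter (e : List (List Int)) :
    ∀ (r : List (List (List Int))) (m : Nat), r.length ≤ m →
    (gStep e)^[m] r = r.dropWhile (fun b => b = e) := by
  intro r
  induction r with
  | nil =>
    intro m _
    have hfix : gStep e [] = [] := by simp [gStep]
    simp [Function.iterate_fixed hfix]
  | cons a t ih =>
    intro m hm
    match m, hm with
    | m + 1, hm =>
      rw [Function.iterate_succ_apply]
      by_cases ha : a = e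
      · have hg : gStep e (a :: t) = t := by simp [gStep, ha]
        rw [hg, ih m (by simpa using hm), List.dropWhile_cons]
        simp [ha]
      · have hg : gStep e (a :: t) = a :: t := by simp [gStep, ha]
        rw [hg, Function.iterate_fixed hg, List.dropWhile_cons]
        simp [ha]

theorem trim_eq (e : List (List Int)) (m : Nat) (xs : List (List (List Int)))
    (h : xs.length ≤ m) :
    (List.range m).foldl (fun acc _i =>
      if acc.getLast? = some e then acc.dropLast else acc) xs
      = (xs.reverse.dropWhile (fun b => b = e)).reverse := by
  have h1 : (List.range m).foldl (fun acc _i =>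
      if acc.getLast? = some e then acc.dropLast else acc) xs = (tStep e)^[m] xs :=
    foldl_const_range (tStep e) m xs
  rw [h1, tIter_reverse, gIter e xs.reverse m (by simpa using h)]

-- dropping k elements of range m leaves range (m-k) shifted by k
theorem drop_range (k m : Nat) (h : k ≤ m) :
    (List.range m).drop k = (List.range (m - k)).map (fun j => k + j) := by
  conv_lhs => rw [show m = k + (m - k) from by omega, List.range_add]
  simp

theorem blocks_eq (n : Nat) (lista : List Int) :
    (List.range n).map (fun b =>
      (((List.range (n * n)).map
          (fun r => ((lista.take (n * n * n)).drop (r * n)).take n)).drop (b * n)).take n)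
    = (List.range n).map (fun b =>
        (List.range n).map (fun j => (lista.drop (b * (n * n) + j * n)).take n)) := by
  apply List.map_congr_left
  intro b hb
  rw [List.mem_range] at hb
  have hbn : b * n + n ≤ n * n := by
    have := Nat.mul_le_mul_right n (Nat.succ_le_of_lt hb)
    calc b * n + n = (b + 1) * n := by ring
      _ ≤ n * n := this
  rw [← List.map_drop, drop_range (b * n) (n * n) (by omega), List.map_map,
    ← List.map_take, List.take_range]
  have hmin : min n (n * n - b * n) = n := by omega
  rw [hmin]
  apply List.map_congr_left
  intro j hj
  rw [List.mem_range] at hj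
  simp only [Function.comp_apply]
  rw [List.drop_take, List.take_take]
  have hbound : (b * n + j) * n + n ≤ n * n * n := by
    have h1 : b * n + j + 1 ≤ n * n := by omega
    calc (b * n + j) * n + n = (b * n + j + 1) * n := by ring
      _ ≤ n * n * n := Nat.mul_le_mul_right n h1
  have hmin2 : min n (n * n * n - (b * n + j) * n) = n := by omega
  rw [hmin2]
  congr 2
  ring

-- ===== VERDICT (by name: the statement is the Claim_ definition above) =====
theorem armando_lista_spec : Claim_equal_armando_lista := by
  intro tablero lista _
  unfold Spec_armando_lista armando_lista armando_lista_alt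
  simp only [aCube_eq, blocks_eq]
  rw [trim_eq]
  simp
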